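-- pv_equiv track=rewrite | github.com/ai-kmu/etc | algorithm/Intermediate_Class/06_n진수게임/hyunji.py | solution
-- ===== SOURCE A (Python) =====
-- def solution(n, t, m, p):
--     answer = ''
--     game = ''
--
--     # 진법 변환해주는 함수 (10 -> n 진법)
--     def change_n(num):
--         number = '0123456789ABCDEF'
--         change = ''
--         a, b = divmod(num, n)
--         change += number[b]
--
--         # 몫이 0이 될 때까지 계속 몫을 n으로 나눠준다
--         while a != 0:
--             a, b = divmod(a, n)
--             # 나머지를 계속 더해준다
--             change += number[b]
--
--         # 문자열을 뒤집어줌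
--         return change[::-1]
--
--     num = 0
--     while len(game) < t * m:
--         # change_n()을 호출해서 n 진법으로 변환된 string을 더해줌
--         game += change_n(num)
--         num += 1
--
--     p = p - 1
--     # t 길이만큼 while 문을 돌고
--     while len(answer) != t:
--         # 튜브가 답해야 하는 숫자만 answer에 더해줌
--         answer += game[p]
--         p += m
--
--     return answer
-- ===== SOURCE B (Python) =====
-- def solution(n, t, m, p):
--     digits = '0123456789ABCDEF'
--
--     # most-significant-first base-n string of num, by recursion (no reversal)
--     def conv(num):
--         if num < n:
--             return digits[num]
--         return conv(num // n) + digits[num % n]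
--
--     need = t * m
--     # stage 1: how many numbers 0,1,2,... are needed to cover `need` digits
--     total = 0
--     count = 0
--     while total < need:
--         total += len(conv(count))
--         count += 1
--     # stage 2: build the whole stream in one join
--     game = ''.join(conv(i) for i in range(count))
--     # stage 3: player p's digits picked by direct indexing
--     return ''.join(game[p - 1 + k * m] for k in range(t))
-- ===== Notes on version B (the rewrite author's own statement) =====
-- stated objective: alternative
-- what changed: B splits A's interleaved build-then-walk into three stages with different mechanisms: a recursive most-significant-first base conversion (no divmod loop, no string reversal), a counting pass that only measures how many numbers are needed, one join of the conversions over range(count), and direct indexed extraction game[p-1+k*m] for k in range(t) instead of A's stepping while-loop over a growing answer string.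
-- outside the precondition, e.g. on solution(-3, 6, 8, 3): A returns 'EFEEEE', B raises RecursionError; on solution(17, 1, 1, 1): A returns '0', B returns '0'; on solution(2, 3, 2, 0): A returns '110', B returns '110'
import Mathlib
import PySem

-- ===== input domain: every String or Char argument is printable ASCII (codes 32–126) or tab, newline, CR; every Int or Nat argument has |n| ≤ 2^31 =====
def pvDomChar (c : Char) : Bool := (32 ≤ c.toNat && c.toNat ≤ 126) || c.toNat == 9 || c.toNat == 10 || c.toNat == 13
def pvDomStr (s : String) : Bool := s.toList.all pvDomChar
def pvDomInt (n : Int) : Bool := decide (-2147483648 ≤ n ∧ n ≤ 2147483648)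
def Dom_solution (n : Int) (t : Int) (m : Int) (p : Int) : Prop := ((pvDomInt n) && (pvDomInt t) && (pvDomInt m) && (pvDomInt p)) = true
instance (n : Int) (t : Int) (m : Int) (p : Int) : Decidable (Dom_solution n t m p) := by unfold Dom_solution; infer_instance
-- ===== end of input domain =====

-- B replaces A's single streaming build-then-step-walk by three stages: a recursive most-significant-first conversion, a counting pass for how many numbers are needed, one join over a range, and direct indexed extraction: a structurally different, same-cost implementation.


-- ===== PORT A =====
-- number = '0123456789ABCDEF'; number[b] (Python indexing, negative wrap; '?' is unreachable inside Pre_)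
def pvNumber : List Char := "0123456789ABCDEF".toList

def pvDigit (b : Int) : Char := (PySem.List.pyGet? pvNumber b).getD '?'

-- the inner 'while a != 0' loop of change_n; fuel a.toNat suffices inside Pre_ (a shrinks each step)
def pvChangeLoop (n : Int) : Nat → Int → List Char → List Char
  | 0, _, change => change
  | fuel+1, a, change =>
    if a ≠ 0 then
      pvChangeLoop n fuel (PySem.Int.floordiv a n) (change ++ [pvDigit (PySem.Int.mod a n)])
    else change

def pvChangeN (n : Int) (num : Int) : List Char :=
  (pvChangeLoop n ((PySem.Int.floordiv num n).natAbs + 2) (PySem.Int.floordiv num n)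
      [pvDigit (PySem.Int.mod num n)]).reverse

-- the 'while len(game) < t*m' loop; fuel (t*m).toNat suffices (each pass adds ≥ 1 char)
def pvGameLoopA (n : Int) (tm : Int) : Nat → Int → List Char → List Char
  | 0, _, game => game
  | fuel+1, num, game =>
    if (game.length : Int) < tm then
      pvGameLoopA n tm fuel (num + 1) (game ++ pvChangeN n num)
    else game

-- the 'while len(answer) != t' loop; game[p] raising IndexError (none) is outside Pre_
def pvAnswerLoop (t : Int) (m : Int) (game : List Char) : Nat → Int → List Char → List Char
  | 0, _, answer => answer
  | fuel+1, q, answer =>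
    if (answer.length : Int) ≠ t then
      match PySem.List.pyGet? game q with
      | some c => pvAnswerLoop t m game fuel (q + m) (answer ++ [c])
      | none => answer
    else answer

def solution (n : Int) (t : Int) (m : Int) (p : Int) : String :=
  String.mk (pvAnswerLoop t m (pvGameLoopA n (t * m) (t * m).toNat 0 []) t.toNat (p - 1) [])

-- ===== PORT B =====
def pvDigitsB : List Char := "0123456789ABCDEF".toList

-- digits[d] (Python indexing; '?' is unreachable inside Pre_)
def pvDigitB (d : Int) : Char := (PySem.List.pyGet? pvDigitsB d).getD '?'

-- conv(num): recursion on num; fuel num.natAbs + 1 suffices inside Pre_ (num // n strictly shrinks)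
def pvConvAux (n : Int) : Nat → Int → List Char
  | 0, _ => []   -- fuel exhaustion, unreachable inside Pre_
  | f+1, num =>
    if num < n then [pvDigitB num]
    else pvConvAux n f (PySem.Int.floordiv num n) ++ [pvDigitB (PySem.Int.mod num n)]

def pvConv (n : Int) (num : Int) : List Char := pvConvAux n (num.natAbs + 1) num

-- stage 1: 'while total < need' counting loop; fuel need.toNat suffices (each pass adds ≥ 1)
def pvCountLoop (n : Int) (need : Int) : Nat → Int → Int → Int
  | 0, _, count => count
  | f+1, total, count =>
    if total < need then pvCountLoop n need f (total + ((pvConv n count).length : Int)) (count + 1)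
    else count

def solution_alt (n : Int) (t : Int) (m : Int) (p : Int) : String :=
  let need := t * m
  let count := pvCountLoop n need need.toNat 0 0
  let game := (PySem.List.pyRange 0 count 1).flatMap (pvConv n)
  String.mk ((PySem.List.pyRange 0 t 1).map
    (fun k => (PySem.List.pyGet? game (p - 1 + k * m)).getD '?'))

-- ===== PRECONDITION & SPEC =====
-- Pre_ is the natural domain of the game (the source problem guarantees base 2..16, 1 ≤ t, and player 1 ≤ p ≤ m;
-- t = 0 is allowed unconditionally). Outside it A raises on most inputs, and where it still returns (tiny t*m with
-- n > 16, or p outside 1..m read via Python's negative-index wrap / game's overshoot tail) its value is accidental.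
def Pre_solution (n : Int) (t : Int) (m : Int) (p : Int) : Prop :=
  t = 0 ∨ (2 ≤ n ∧ n ≤ 16 ∧ 1 ≤ t ∧ 1 ≤ p ∧ p ≤ m)
instance (n : Int) (t : Int) (m : Int) (p : Int) : Decidable (Pre_solution n t m p) := by
  unfold Pre_solution; infer_instance

def pvWitness_solution : Int × Int × Int × Int := (2, 3, 2, 1)

def Spec_solution (n : Int) (t : Int) (m : Int) (p : Int) (out : String) : Prop := out = solution_alt n t m p
instance (n : Int) (t : Int) (m : Int) (p : Int) (out : String) : Decidable (Spec_solution n t m p out) := by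
  unfold Spec_solution; infer_instance

-- ===== CLAIM (what is proved, stated in full; the proofs are below) =====
def Claim_equal_solution : Prop := ∀ (n : Int) (t : Int) (m : Int) (p : Int), Dom_solution n t m p → Pre_solution n t m p → Spec_solution n t m p (solution n t m p)

-- ===== LEMMAS AND PROOFS =====

-- the least-significant-first base-n digit list of k (fuel-indexed; fuel k.toNat suffices)
def lsfAux (n : Int) : Nat → Int → List Int
  | 0, k => [PySem.Int.mod k n]
  | f+1, k =>
    PySem.Int.mod k n ::
      (if PySem.Int.floordiv k n = 0 then [] else lsfAux n f (PySem.Int.floordiv k n))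

def lsf (n : Int) (k : Int) : List Int := lsfAux n k.toNat k

theorem fd_nonneg {n k : Int} (hn : 2 ≤ n) (hk : 0 ≤ k) : 0 ≤ PySem.Int.floordiv k n := by
  rw [PySem.Int.floordiv_eq_ediv_of_pos (by omega)]
  exact Int.ediv_nonneg hk (by omega)

theorem fd_lt {n k : Int} (hn : 2 ≤ n) (hk : 1 ≤ k) : PySem.Int.floordiv k n < k := by
  rw [PySem.Int.floordiv_lt_iff_lt_mul (by omega)]
  nlinarith

theorem fd_zero {n : Int} (hn : 2 ≤ n) : PySem.Int.floordiv 0 n = 0 := by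
  rw [PySem.Int.floordiv_eq_ediv_of_pos (by omega)]; simp

theorem fd_ne_zero_pos {n k : Int} (hn : 2 ≤ n) (hk : 0 ≤ k)
    (h : PySem.Int.floordiv k n ≠ 0) : 1 ≤ k := by
  rcases lt_or_ge k 1 with h1 | h1
  · exfalso; apply h
    have : k = 0 := by omega
    rw [this]; exact fd_zero hn
  · exact h1

theorem lsfAux_fuel {n : Int} (hn : 2 ≤ n) :
    ∀ (f f' : Nat) (k : Int), 0 ≤ k → k.toNat ≤ f → k.toNat ≤ f' →
      lsfAux n f k = lsfAux n f' k := by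
  intro f
  induction f with
  | zero =>
    intro f' k hk h0 h1
    have hk0 : k = 0 := by omega
    subst hk0
    cases f' with
    | zero => rfl
    | succ f' => simp [lsfAux, fd_zero hn]
  | succ f ih =>
    intro f' k hk h0 h1
    cases f' with
    | zero =>
      have hk0 : k = 0 := by omega
      subst hk0
      simp [lsfAux, fd_zero hn]
    | succ f' =>
      simp only [lsfAux]
      by_cases hfd : PySem.Int.floordiv k n = 0
      · simp [hfd]
      · simp only [hfd, ite_false]
        have hk1 : 1 ≤ k := fd_ne_zero_pos hn hk hfd
        have hlt : PySem.Int.floordiv k n < k := fd_lt hn hk1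
        have hge : 0 ≤ PySem.Int.floordiv k n := fd_nonneg hn (by omega)
        rw [ih f' (PySem.Int.floordiv k n) hge (by omega) (by omega)]

theorem lsf_eq {n k : Int} (hn : 2 ≤ n) (hk : 0 ≤ k) :
    lsf n k = PySem.Int.mod k n ::
      (if PySem.Int.floordiv k n = 0 then [] else lsf n (PySem.Int.floordiv k n)) := by
  unfold lsf
  cases hK : k.toNat with
  | zero =>
    have hk0 : k = 0 := by omega
    subst hk0
    simp [lsfAux, fd_zero hn]
  | succ f =>
    simp only [lsfAux]
    by_cases hfd : PySem.Int.floordiv k n = 0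
    · simp [hfd]
    · simp only [hfd, ite_false]
      have hk1 : 1 ≤ k := fd_ne_zero_pos hn hk hfd
      have hlt : PySem.Int.floordiv k n < k := fd_lt hn hk1
      have hge : 0 ≤ PySem.Int.floordiv k n := fd_nonneg hn hk
      rw [lsfAux_fuel hn f (PySem.Int.floordiv k n).toNat (PySem.Int.floordiv k n) hge (by omega) (by omega)]

-- change_n's inner loop produces the digit characters of a in LSF order
theorem changeLoop_eq {n : Int} (hn : 2 ≤ n) :
    ∀ (K : Nat) (a : Int), 0 ≤ a → a.toNat = K →
      ∀ (fuel : Nat) (acc : List Char), a.toNat ≤ fuel →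
        pvChangeLoop n fuel a acc =
          acc ++ (if a = 0 then [] else (lsf n a).map pvDigit) := by
  intro K
  induction K using Nat.strong_induction_on with
  | _ K ih =>
    intro a ha hK fuel acc hfuel
    by_cases ha0 : a = 0
    · subst ha0
      cases fuel with
      | zero => simp [pvChangeLoop]
      | succ f => simp [pvChangeLoop]
    · have ha1 : 1 ≤ a := by omega
      cases fuel with
      | zero => omega
      | succ f =>
        simp only [pvChangeLoop, ha0, ne_eq, not_false_iff, if_pos]
        have hlt : PySem.Int.floordiv a n < a := fd_lt hn ha1
        have hge : 0 ≤ PySem.Int.floordiv a n := fd_nonneg hn ha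
        rw [ih (PySem.Int.floordiv a n).toNat (by omega) (PySem.Int.floordiv a n) hge rfl f
            (acc ++ [pvDigit (PySem.Int.mod a n)]) (by omega)]
        conv_rhs => rw [lsf_eq hn ha, List.map_cons]
        by_cases hfd : PySem.Int.floordiv a n = 0
        · simp [hfd]
        · simp [hfd, List.append_assoc]

theorem changeN_eq {n k : Int} (hn : 2 ≤ n) (hk : 0 ≤ k) :
    pvChangeN n k = ((lsf n k).map pvDigit).reverse := by
  unfold pvChangeN
  have hge : 0 ≤ PySem.Int.floordiv k n := fd_nonneg hn hk
  rw [changeLoop_eq hn (PySem.Int.floordiv k n).toNat (PySem.Int.floordiv k n) hge rfl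
      ((PySem.Int.floordiv k n).natAbs + 2) [pvDigit (PySem.Int.mod k n)] (by omega)]
  rw [lsf_eq hn hk]
  by_cases hfd : PySem.Int.floordiv k n = 0 <;> simp [hfd]

theorem digitB_eq_digit : pvDigitB = pvDigit := rfl

-- B's recursive conversion produces the digits of k in MSF order
theorem convAux_eq {n : Int} (hn : 2 ≤ n) :
    ∀ (K : Nat) (k : Int), 0 ≤ k → k.toNat = K →
      ∀ (f : Nat), k.toNat < f →
        pvConvAux n f k = ((lsf n k).map pvDigit).reverse := by
  intro K
  induction K using Nat.strong_induction_on with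
  | _ K ih =>
    intro k hk hK f hf
    cases f with
    | zero => omega
    | succ f =>
      simp only [pvConvAux, digitB_eq_digit]
      by_cases hkn : k < n
      · -- one digit: floordiv k n = 0 and mod k n = k
        have hfd : PySem.Int.floordiv k n = 0 := by
          rw [PySem.Int.floordiv_eq_iff_of_pos (by omega)]
          constructor <;> nlinarith
        have hmod : PySem.Int.mod k n = k := by
          have := PySem.Int.floordiv_mul_add_mod k n
          rw [hfd] at this; linarith
        rw [if_pos hkn, lsf_eq hn hk, hfd, hmod]
        simp
      · have hk1 : 1 ≤ k := by omega
        have hlt : PySem.Int.floordiv k n < k := fd_lt hn hk1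
        have hge : 0 ≤ PySem.Int.floordiv k n := fd_nonneg hn hk
        have hfd : PySem.Int.floordiv k n ≠ 0 := by
          intro h0
          have := PySem.Int.floordiv_mul_add_mod k n
          have hm : PySem.Int.mod k n < n := PySem.Int.mod_lt k (by omega)
          rw [h0] at this
          omega
        rw [if_neg hkn,
          ih (PySem.Int.floordiv k n).toNat (by omega) (PySem.Int.floordiv k n) hge rfl f (by omega)]
        conv_rhs => rw [lsf_eq hn hk, List.map_cons]
        simp [hfd]

theorem conv_eq_changeN {n k : Int} (hn : 2 ≤ n) (hk : 0 ≤ k) :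
    pvConv n k = pvChangeN n k := by
  rw [changeN_eq hn hk]
  exact convAux_eq hn k.toNat k hk rfl (k.natAbs + 1) (by omega)

theorem conv_len_pos {n k : Int} (hn : 2 ≤ n) (hk : 0 ≤ k) :
    1 ≤ ((pvConv n k).length : Int) := by
  rw [conv_eq_changeN hn hk, changeN_eq hn hk, lsf_eq hn hk]
  simp

-- the counting loop never decreases count
theorem countLoop_ge (n need : Int) :
    ∀ (fuel : Nat) (total count : Int), count ≤ pvCountLoop n need fuel total count := by
  intro fuel
  induction fuel with
  | zero => intro total count; exact le_refl _
  | succ f ih =>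
    intro total count
    simp only [pvCountLoop]
    by_cases hc : total < need
    · simp only [hc, ite_true]
      calc count ≤ count + 1 := by omega
        _ ≤ _ := ih _ _
    · simp [hc]

-- A's game loop builds exactly the join of pvConv over range(count0, final count)
theorem gameA_eq {n tm : Int} (hn : 2 ≤ n) :
    ∀ (fuel : Nat) (count : Int) (g : List Char), 0 ≤ count →
      pvGameLoopA n tm fuel count g =
        g ++ (PySem.List.pyRange count (pvCountLoop n tm fuel (g.length : Int) count) 1).flatMap
              (pvConv n) := by
  intro fuel
  induction fuel with
  | zero =>
    intro count g hc
    simp [pvGameLoopA, pvCountLoop, PySem.List.pyRange_one_eq_nil (le_refl count)]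
  | succ f ih =>
    intro count g hc
    simp only [pvGameLoopA, pvCountLoop]
    by_cases hlt : (g.length : Int) < tm
    · simp only [hlt, ite_true]
      rw [ih (count + 1) (g ++ pvChangeN n count) (by omega)]
      have hglen : ((g ++ pvChangeN n count).length : Int)
          = (g.length : Int) + ((pvConv n count).length : Int) := by
        rw [conv_eq_changeN hn hc]
        simp
      rw [hglen]
      have hC : count < pvCountLoop n tm f ((g.length : Int) + ((pvConv n count).length : Int)) (count + 1) := by
        have := countLoop_ge n tm f ((g.length : Int) + ((pvConv n count).length : Int)) (count + 1)
        omega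
      rw [PySem.List.pyRange_one_cons hC, List.flatMap_cons, conv_eq_changeN hn hc]
      simp [List.append_assoc]
    · simp [hlt, PySem.List.pyRange_one_eq_nil (le_refl count)]

-- with fuel ≥ tm - |g| the game loop reaches length ≥ tm
theorem gameA_len {n tm : Int} (hn : 2 ≤ n) :
    ∀ (fuel : Nat) (count : Int) (g : List Char), 0 ≤ count →
      tm ≤ (g.length : Int) + fuel →
      tm ≤ ((pvGameLoopA n tm fuel count g).length : Int) := by
  intro fuel
  induction fuel with
  | zero =>
    intro count g hc h
    simpa [pvGameLoopA] using h
  | succ f ih =>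
    intro count g hc h
    simp only [pvGameLoopA]
    by_cases hlt : (g.length : Int) < tm
    · simp only [hlt, ite_true]
      apply ih (count + 1) _ (by omega)
      have h1 : 1 ≤ ((pvChangeN n count).length : Int) := by
        rw [← conv_eq_changeN hn hc]
        exact conv_len_pos hn hc
      simp only [List.length_append]
      push_cast
      push_cast at h
      omega
    · simpa [hlt] using by omega

-- A's answer loop equals the indexed comprehension over range(j, t)
theorem ansA_eq (t m p : Int) (G : List Char) (hp1 : 1 ≤ p) (hpm : p ≤ m)
    (hG : t * m ≤ (G.length : Int)) :
    ∀ (fuel : Nat) (j : Int) (out : List Char), 0 ≤ j → j ≤ t → t - j ≤ (fuel : Int) →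
      (out.length : Int) = j →
      pvAnswerLoop t m G fuel (p - 1 + j * m) out =
        out ++ (PySem.List.pyRange j t 1).map
          (fun k => (PySem.List.pyGet? G (p - 1 + k * m)).getD '?') := by
  intro fuel
  induction fuel with
  | zero =>
    intro j out hj0 hjt hfuel hlen
    have hjt' : j = t := by push_cast at hfuel; omega
    simp [pvAnswerLoop, hjt', PySem.List.pyRange_one_eq_nil (le_refl t)]
  | succ f ih =>
    intro j out hj0 hjt hfuel hlen
    by_cases hj : j = t
    · subst hj
      simp [pvAnswerLoop, hlen, PySem.List.pyRange_one_eq_nil (le_refl j)]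
    · have hjlt : j < t := by omega
      have hne : (out.length : Int) ≠ t := by omega
      have hidx0 : 0 ≤ p - 1 + j * m := by
        have : 0 ≤ j * m := mul_nonneg hj0 (by omega)
        omega
      have hidxlt : p - 1 + j * m < (G.length : Int) := by
        have h1 : j * m ≤ (t - 1) * m := mul_le_mul_of_nonneg_right (by omega) (by omega)
        have h2 : (t - 1) * m = t * m - m := by ring
        omega
      have hget := PySem.List.pyGet?_eq_some_getElem (xs := G) hidx0 (by exact_mod_cast hidxlt)
      simp only [pvAnswerLoop, hne, ne_eq, not_false_iff, ite_true, hget]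
      have hq : p - 1 + j * m + m = p - 1 + (j + 1) * m := by ring
      rw [hq, ih (j + 1) (out ++ [G[(p - 1 + j * m).toNat]]) (by omega) (by omega)
            (by push_cast at hfuel ⊢; omega) (by simp; omega)]
      rw [PySem.List.pyRange_one_cons hjlt, List.map_cons, hget]
      simp [List.append_assoc]

-- ===== VERDICT (by name: the statement is the Claim_ definition above) =====
theorem solution_spec : Claim_equal_solution := by
  intro n t m p _ hpre
  unfold Spec_solution solution solution_alt
  rcases hpre with ht0 | ⟨hn, _, ht, hp1, hpm⟩
  · subst ht0
    simp [pvAnswerLoop, pvCountLoop, pvGameLoopA, zero_mul,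
      PySem.List.pyRange_one_eq_nil (le_refl (0 : Int))]
  · have htm1 : 1 ≤ t * m := by nlinarith
    have hgame := gameA_eq (tm := t * m) hn (t * m).toNat 0 [] (le_refl 0)
    have hlen : t * m ≤ ((pvGameLoopA n (t * m) (t * m).toNat 0 []).length : Int) := by
      apply gameA_len hn (t * m).toNat 0 [] (le_refl 0)
      simp [Int.toNat_of_nonneg (by omega : (0:Int) ≤ t * m)]
    have hstart : p - 1 = p - 1 + 0 * m := by ring
    rw [hstart, ansA_eq t m p _ hp1 hpm hlen t.toNat 0 [] (le_refl 0) (by omega)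
        (by simp [Int.toNat_of_nonneg (by omega : (0:Int) ≤ t)]) (by simp)]
    have hgame' : pvGameLoopA n (t * m) (t * m).toNat 0 [] =
        (PySem.List.pyRange 0 (pvCountLoop n (t * m) (t * m).toNat 0 0) 1).flatMap (pvConv n) := by
      simpa using hgame
    rw [hgame']
    simp
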